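-- pv_equiv track=rewrite | github.com/xiuwenz2/SAPC-template | utils/mfa/generate_manifest.py | merge_apostrophe_tokens
-- ===== SOURCE A (Python) =====
-- def merge_apostrophe_tokens(text):
--     tokens = text.split()
--     if not tokens:
--         return text
--     merged_tokens = []
--     i = 0
--     while i < len(tokens):
--         token = tokens[i]
--         if token.endswith("'") and i + 1 < len(tokens):
--             token = token + tokens[i+1]
--             i += 2
--         else:
--             i += 1
--         if token.startswith("'") and merged_tokens:
--             merged_tokens[-1] = merged_tokens[-1] + token
--         else:
--             merged_tokens.append(token)
--     return " ".join(merged_tokens)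
-- ===== SOURCE B (Python) =====
-- def merge_apostrophe_tokens(text):
--     tokens = text.split()
--     if not tokens:
--         return text
--     # pass 1: greedy forward merge of a token ending with ' with its successor
--     units = []
--     i = 0
--     n = len(tokens)
--     while i < n:
--         if tokens[i].endswith("'") and i + 1 < n:
--             units.append(tokens[i] + tokens[i + 1])
--             i += 2
--         else:
--             units.append(tokens[i])
--             i += 1
--     # pass 2: glue units starting with ' onto the previous result element
--     result = []
--     for u in units:
--         if u.startswith("'") and result:
--             result[-1] += u
--         else:
--             result.append(u)
--     return " ".join(result)
-- ===== Notes on version B (the rewrite author's own statement) =====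
-- stated objective: alternative
-- what changed: A's single interleaved while-loop is split into two separate passes: a first pass building the list of greedily forward-merged units, then a fold that glues units starting with an apostrophe onto the previous result element.
import Mathlib
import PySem

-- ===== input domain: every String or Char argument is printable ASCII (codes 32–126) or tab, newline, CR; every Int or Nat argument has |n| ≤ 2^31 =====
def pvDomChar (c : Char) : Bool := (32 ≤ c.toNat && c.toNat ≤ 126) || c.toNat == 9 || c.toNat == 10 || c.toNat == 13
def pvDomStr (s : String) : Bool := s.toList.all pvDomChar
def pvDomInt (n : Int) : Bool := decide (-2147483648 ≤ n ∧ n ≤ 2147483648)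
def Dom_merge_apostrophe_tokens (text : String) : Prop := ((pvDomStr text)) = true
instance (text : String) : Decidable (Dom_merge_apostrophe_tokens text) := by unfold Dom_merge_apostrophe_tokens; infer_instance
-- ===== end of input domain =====

-- B re-decomposes A's single interleaved while-loop into two separate passes
-- (forward apostrophe-suffix merge, then a fold gluing apostrophe-prefixed units);
-- objective: alternative decomposition, same cost.

-- ===== PORT A =====
-- single while-loop: merge with successor when token ends with ', then either glue
-- onto merged_tokens[-1] (when it starts with ') or append, all in one pass
def mergeLoopA (acc : List (List Char)) : List (List Char) → List (List Char)
  | [] => acc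
  | [t] =>
      -- i + 1 < len(tokens) is false: token = tokens[i]
      if PySem.Chars.startswith t ['\''] && !acc.isEmpty then
        acc.dropLast ++ [acc.getLast! ++ t]
      else
        acc ++ [t]
  | t :: u :: rest =>
      if PySem.Chars.endswith t ['\''] then
        -- token = tokens[i] + tokens[i+1]; i += 2
        mergeLoopA (if PySem.Chars.startswith (t ++ u) ['\''] && !acc.isEmpty then
                      acc.dropLast ++ [acc.getLast! ++ (t ++ u)]
                    else acc ++ [t ++ u]) rest
      else
        -- i += 1
        mergeLoopA (if PySem.Chars.startswith t ['\''] && !acc.isEmpty then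
                      acc.dropLast ++ [acc.getLast! ++ t]
                    else acc ++ [t]) (u :: rest)

def merge_apostrophe_tokens (text : String) : String :=
  let tokens := PySem.Chars.split₀ text.toList
  if tokens = [] then text
  else String.mk (PySem.Chars.join [' '] (mergeLoopA [] tokens))

-- ===== PORT B =====
-- pass 1: greedy forward merge of a token ending with ' with its successor
def unitsB : List (List Char) → List (List Char)
  | [] => []
  | [t] => [t]
  | t :: u :: rest =>
      if PySem.Chars.endswith t ['\''] then (t ++ u) :: unitsB rest
      else t :: unitsB (u :: rest)

-- pass 2 step: glue a unit starting with ' onto the last result element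
def glueB (res : List (List Char)) (u : List Char) : List (List Char) :=
  if PySem.Chars.startswith u ['\''] && !res.isEmpty then
    res.dropLast ++ [res.getLast! ++ u]
  else res ++ [u]

def merge_apostrophe_tokens_alt (text : String) : String :=
  let tokens := PySem.Chars.split₀ text.toList
  if tokens = [] then text
  else String.mk (PySem.Chars.join [' '] ((unitsB tokens).foldl glueB []))

-- ===== PRECONDITION & SPEC =====
def Spec_merge_apostrophe_tokens (text : String) (out : String) : Prop := out = merge_apostrophe_tokens_alt text
instance (text : String) (out : String) : Decidable (Spec_merge_apostrophe_tokens text out) := by unfold Spec_merge_apostrophe_tokens; infer_instance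

-- ===== CLAIM (what is proved, stated in full; the proofs are below) =====
def Claim_equal_merge_apostrophe_tokens : Prop := ∀ (text : String), Dom_merge_apostrophe_tokens text → Spec_merge_apostrophe_tokens text (merge_apostrophe_tokens text)

-- ===== LEMMAS AND PROOFS =====
theorem mergeLoopA_eq_foldl (ts : List (List Char)) :
    ∀ acc, mergeLoopA acc ts = (unitsB ts).foldl glueB acc := by
  induction ts using unitsB.induct with
  | case1 => intro acc; simp [mergeLoopA, unitsB]
  | case2 t => intro acc; simp [mergeLoopA, unitsB, glueB]
  | case3 t u rest h ih =>
      intro acc; simp [mergeLoopA, unitsB, h, ih, glueB]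
  | case4 t u rest h ih =>
      intro acc; simp [mergeLoopA, unitsB, h, ih, glueB]

-- ===== VERDICT (by name: the statement is the Claim_ definition above) =====
theorem merge_apostrophe_tokens_spec : Claim_equal_merge_apostrophe_tokens := by
  intro text _
  unfold Spec_merge_apostrophe_tokens merge_apostrophe_tokens merge_apostrophe_tokens_alt
  simp only [mergeLoopA_eq_foldl]
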